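-- pv_equiv track=rewrite | github.com/tianbaiting/tianbaiting.github.io | scripts/remove_markdown_bold.py | strip_bold_markers_from_line
-- ===== SOURCE A (Python) =====
-- def strip_bold_markers_from_line(line: str) -> tuple[str, int]:
--     if "**" not in line:
--         return line, 0
--
--     output: list[str] = []
--     replacements = 0
--     in_code_span = False
--     code_span_ticks = 0
--     idx = 0
--
--     while idx < len(line):
--         if line[idx] == "`":
--             tick_end = idx
--             while tick_end < len(line) and line[tick_end] == "`":
--                 tick_end += 1
--
--             tick_count = tick_end - idx
--             output.append(line[idx:tick_end])
--
--             if not in_code_span: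
--                 in_code_span = True
--                 code_span_ticks = tick_count
--             elif tick_count == code_span_ticks:
--                 in_code_span = False
--                 code_span_ticks = 0
--
--             idx = tick_end
--             continue
--
--         if not in_code_span and line.startswith("**", idx):
--             replacements += 1
--             idx += 2
--             continue
--
--         output.append(line[idx])
--         idx += 1
--
--     return "".join(output), replacements
-- ===== SOURCE B (Python) =====
-- def strip_bold_markers_from_line(line: str) -> tuple[str, int]:
--     if "**" not in line:
--         return line, 0
--
--     # Phase 1: tokenize into maximal backtick runs and maximal non-backtick chunks.
--     tokens = []
--     i = 0
--     n = len(line)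
--     while i < n:
--         j = i + 1
--         if line[i] == "`":
--             while j < n and line[j] == "`":
--                 j += 1
--         else:
--             while j < n and line[j] != "`":
--                 j += 1
--         tokens.append(line[i:j])
--         i = j
--
--     # Phase 2: fold over tokens with the code-span state machine.
--     out = []
--     replacements = 0
--     in_code_span = False
--     code_span_ticks = 0
--     for tok in tokens:
--         if tok[0] == "`":
--             out.append(tok)
--             if not in_code_span:
--                 in_code_span = True
--                 code_span_ticks = len(tok)
--             elif len(tok) == code_span_ticks:
--                 in_code_span = False
--                 code_span_ticks = 0
--         elif in_code_span:
--             out.append(tok)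
--         else:
--             stripped, k = _strip_double_stars(tok)
--             out.append(stripped)
--             replacements += k
--     return "".join(out), replacements
--
--
-- def _strip_double_stars(text: str) -> tuple[str, int]:
--     out = []
--     count = 0
--     i = 0
--     while i < len(text):
--         if text.startswith("**", i):
--             count += 1
--             i += 2
--         else:
--             out.append(text[i])
--             i += 1
--     return "".join(out), count
-- ===== Notes on version B (the rewrite author's own statement) =====
-- stated objective: alternative
-- what changed: B first tokenizes the line into maximal backtick-run / non-backtick-chunk tokens and then folds the code-span state machine over whole tokens (stripping ** per text chunk with a helper), instead of A's single character-indexed while loop.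
import Mathlib
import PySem

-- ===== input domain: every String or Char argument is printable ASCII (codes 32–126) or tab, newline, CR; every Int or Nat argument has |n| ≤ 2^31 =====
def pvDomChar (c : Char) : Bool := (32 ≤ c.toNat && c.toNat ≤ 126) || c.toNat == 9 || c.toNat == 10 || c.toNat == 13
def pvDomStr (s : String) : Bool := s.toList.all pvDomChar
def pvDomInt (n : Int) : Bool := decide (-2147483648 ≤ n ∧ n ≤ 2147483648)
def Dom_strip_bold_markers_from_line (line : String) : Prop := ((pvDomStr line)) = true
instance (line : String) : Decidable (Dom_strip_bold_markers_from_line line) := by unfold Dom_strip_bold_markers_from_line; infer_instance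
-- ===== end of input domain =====

-- B tokenizes the line into maximal backtick/non-backtick runs and folds the span state machine over tokens (alternative decomposition, same cost).


-- ===== PORT A =====
-- A's while loop: index scan with in_code_span / code_span_ticks state, one char (or run / "**") per step.
def pvGoA : List Char → Bool → Nat → List Char → Int → List Char × Int
  | [], _, _, acc, r => (acc, r)
  | c :: rest, inCode, ticks, acc, r =>
    if c = '`' then
      -- the inner tick_end scan: the maximal backtick run starting here
      let run := rest.takeWhile (· = '`')
      let rest' := rest.dropWhile (· = '`')
      if inCode = false then pvGoA rest' true (run.length + 1) (acc ++ '`' :: run) r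
      else if run.length + 1 = ticks then pvGoA rest' false 0 (acc ++ '`' :: run) r
      else pvGoA rest' inCode ticks (acc ++ '`' :: run) r
    else if inCode = false ∧ c = '*' ∧ rest.headD '`' = '*' then
      pvGoA rest.tail inCode ticks acc (r + 1)
    else
      pvGoA rest inCode ticks (acc ++ [c]) r
  termination_by cs => cs.length
  decreasing_by
    all_goals simp only [List.length_cons, Nat.lt_succ_iff]
    all_goals first
      | exact List.length_dropWhile_le _ _
      | (cases rest <;> simp)

def strip_bold_markers_from_line (line : String) : String × Int :=
  if PySem.Chars.isIn ['*', '*'] line.toList = false then (line, 0)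
  else
    let res := pvGoA line.toList false 0 [] 0
    (String.ofList res.1, res.2)

-- ===== PORT B =====
-- Source B phase 1: maximal backtick runs / non-backtick chunks
def pvTokenize : List Char → List (List Char)
  | [] => []
  | c :: rest =>
    if c = '`' then ('`' :: rest.takeWhile (· = '`')) :: pvTokenize (rest.dropWhile (· = '`'))
    else (c :: rest.takeWhile (· ≠ '`')) :: pvTokenize (rest.dropWhile (· ≠ '`'))
  termination_by cs => cs.length
  decreasing_by
    · simpa [Nat.lt_succ_iff] using List.length_dropWhile_le (· = '`') rest
    · simpa [Nat.lt_succ_iff] using List.length_dropWhile_le (· ≠ '`') rest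

-- Source B _strip_double_stars
def pvStrip2 : List Char → List Char × Int
  | [] => ([], 0)
  | c :: rest =>
    if c = '*' ∧ rest.headD '`' = '*' then
      let p := pvStrip2 rest.tail
      (p.1, p.2 + 1)
    else
      let p := pvStrip2 rest
      (c :: p.1, p.2)
  termination_by cs => cs.length
  decreasing_by
    · cases rest <;> simp
    · simp

-- Source B phase 2: fold the state machine over whole tokens
def pvGoB : List (List Char) → Bool → Nat → List Char → Int → List Char × Int
  | [], _, _, acc, r => (acc, r)
  | tok :: toks, inCode, ticks, acc, r =>
    if tok.headD ' ' = '`' then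
      if inCode = false then pvGoB toks true tok.length (acc ++ tok) r
      else if tok.length = ticks then pvGoB toks false 0 (acc ++ tok) r
      else pvGoB toks inCode ticks (acc ++ tok) r
    else if inCode then pvGoB toks inCode ticks (acc ++ tok) r
    else
      let p := pvStrip2 tok
      pvGoB toks inCode ticks (acc ++ p.1) (r + p.2)

def strip_bold_markers_from_line_alt (line : String) : String × Int :=
  if PySem.Chars.isIn ['*', '*'] line.toList = false then (line, 0)
  else
    let res := pvGoB (pvTokenize line.toList) false 0 [] 0
    (String.ofList res.1, res.2)

-- ===== PRECONDITION & SPEC =====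
def Spec_strip_bold_markers_from_line (line : String) (out : String × Int) : Prop := out = strip_bold_markers_from_line_alt line
instance (line : String) (out : String × Int) : Decidable (Spec_strip_bold_markers_from_line line out) := by unfold Spec_strip_bold_markers_from_line; infer_instance

-- ===== CLAIM (what is proved, stated in full; the proofs are below) =====
def Claim_equal_strip_bold_markers_from_line : Prop := ∀ (line : String), Dom_strip_bold_markers_from_line line → Spec_strip_bold_markers_from_line line (strip_bold_markers_from_line line)

-- ===== LEMMAS AND PROOFS =====

theorem headD_dropWhile_ne (l : List Char) : (l.dropWhile (· ≠ '`')).headD '`' = '`' := by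
  induction l with
  | nil => rfl
  | cons c rest ih =>
    by_cases h : c = '`'
    · subst h; simp
    · simpa [List.dropWhile_cons, h] using ih

-- A's loop through a non-backtick chunk while inside a code span: verbatim append
theorem pvGoA_text_inCode (chunk : List Char) (rest : List Char) (t : Nat) (acc : List Char) (r : Int)
    (hall : ∀ x ∈ chunk, x ≠ '`') :
    pvGoA (chunk ++ rest) true t acc r = pvGoA rest true t (acc ++ chunk) r := by
  induction chunk generalizing acc with
  | nil => simp
  | cons c ch ih =>
    have hc : c ≠ '`' := hall c List.mem_cons_self
    rw [List.cons_append, pvGoA, if_neg hc, if_neg (by simp)]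
    rw [ih (acc ++ [c]) (fun x hx => hall x (List.mem_cons_of_mem _ hx))]
    simp

-- A's loop through a non-backtick chunk outside a code span = B's _strip_double_stars on the chunk
theorem pvGoA_text (chunk : List Char) (rest : List Char) (t : Nat) (acc : List Char) (r : Int)
    (hall : ∀ x ∈ chunk, x ≠ '`') (hrest : rest.headD '`' = '`') :
    pvGoA (chunk ++ rest) false t acc r
      = pvGoA rest false t (acc ++ (pvStrip2 chunk).1) (r + (pvStrip2 chunk).2) := by
  induction chunk using pvStrip2.induct generalizing acc r with
  | case1 => simp [pvStrip2]
  | case2 c ch h ih =>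
    obtain ⟨hc, hh⟩ := h
    cases ch with
    | nil => simp at hh
    | cons d ch' =>
      simp only [List.headD_cons] at hh
      subst hc; subst hh
      simp only [List.tail_cons] at ih
      rw [List.cons_append, pvGoA, if_neg (by decide),
        if_pos (by refine ⟨rfl, rfl, ?_⟩; simp)]
      simp only [List.tail_cons, List.cons_append]
      rw [ih acc (r + 1) (fun x hx => hall x (List.mem_cons_of_mem _ (List.mem_cons_of_mem _ hx)))]
      rw [pvStrip2, if_pos (by exact ⟨rfl, rfl⟩)]
      simp only [List.tail_cons]
      ring_nf
  | case3 c ch h ih =>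
    have hc : c ≠ '`' := hall c List.mem_cons_self
    have hcond : ¬ ((false : Bool) = false ∧ c = '*' ∧ (ch ++ rest).headD '`' = '*') := by
      rintro ⟨-, hcs, hhd⟩
      apply h
      refine ⟨hcs, ?_⟩
      cases ch with
      | nil =>
        simp only [List.nil_append] at hhd
        rw [hrest] at hhd
        exact absurd hhd (by decide)
      | cons d ch' => simpa using hhd
    rw [List.cons_append, pvGoA, if_neg hc, if_neg hcond]
    rw [ih (acc ++ [c]) r (fun x hx => hall x (List.mem_cons_of_mem _ hx))]
    rw [pvStrip2, if_neg h]
    simp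

-- main loop correspondence: A's scan = B's fold over the tokenization
theorem pvGoA_eq_pvGoB (cs : List Char) (inCode : Bool) (ticks : Nat) (acc : List Char) (r : Int) :
    pvGoA cs inCode ticks acc r = pvGoB (pvTokenize cs) inCode ticks acc r := by
  induction cs using pvTokenize.induct generalizing inCode ticks acc r with
  | case1 => simp [pvGoA, pvTokenize, pvGoB]
  | case2 rest ih =>
    rw [pvTokenize, if_pos rfl, pvGoA, if_pos rfl, pvGoB]
    rw [show ((('`' : Char) :: rest.takeWhile (· = '`')).headD ' ') = '`' from rfl, if_pos rfl]
    simp only [List.length_cons]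
    cases inCode with
    | false =>
      rw [if_pos rfl, if_pos rfl]
      exact ih _ _ _ _
    | true =>
      rw [if_neg (show ¬((true : Bool) = false) by decide)]
      rw [if_neg (show ¬((true : Bool) = false) by decide)]
      by_cases ht : (rest.takeWhile (· = '`')).length + 1 = ticks
      · rw [if_pos ht, if_pos ht]; exact ih _ _ _ _
      · rw [if_neg ht, if_neg ht]; exact ih _ _ _ _
  | case3 c rest h ih =>
    rw [pvTokenize, if_neg h, pvGoB]
    rw [show (c :: rest.takeWhile (· ≠ '`')).headD ' ' = c from rfl, if_neg h]
    have hall : ∀ x ∈ c :: rest.takeWhile (· ≠ '`'), x ≠ '`' := by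
      intro x hx
      rcases List.mem_cons.mp hx with h1 | h1
      · subst h1; exact h
      · simpa using List.mem_takeWhile_imp h1
    have hsplit : c :: rest = (c :: rest.takeWhile (· ≠ '`')) ++ rest.dropWhile (· ≠ '`') := by
      simp [List.takeWhile_append_dropWhile]
    cases inCode with
    | true =>
      rw [if_pos rfl]
      rw [hsplit, pvGoA_text_inCode _ _ _ _ _ hall, ih]
    | false =>
      rw [if_neg (by decide)]
      rw [hsplit, pvGoA_text _ _ _ _ _ hall (headD_dropWhile_ne rest), ih]

-- ===== VERDICT (by name: the statement is the Claim_ definition above) =====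
theorem strip_bold_markers_from_line_spec : Claim_equal_strip_bold_markers_from_line := by
  intro line _
  unfold Spec_strip_bold_markers_from_line strip_bold_markers_from_line strip_bold_markers_from_line_alt
  by_cases h : PySem.Chars.isIn ['*', '*'] line.toList = false
  · simp [h]
  · simp only [h, pvGoA_eq_pvGoB]
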